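-- pv_equiv track=rewrite | github.com/haichuanlyu/MASC599_PolymerProject | Polymer Project/Archive/find_possible_chemical_group.py | last_paren_is_left
-- ===== SOURCE A (Python) =====
-- def last_paren_is_left(sth):
--     k = len(sth) - 1
--     while k >= 0:
--         if sth[k] == '(':
--             return True
--         if sth[k] == ')':
--             return False
--         k -= 1
--     return False
-- ===== SOURCE B (Python) =====
-- def last_paren_is_left(sth):
--     parens = [c for c in sth if c in '()']
--     return bool(parens) and parens[-1] == '('
-- ===== Notes on version B (the rewrite author's own statement) =====
-- stated objective: simpler
-- what changed: Replaces the interleaved reverse index loop with early exit by building the list of parenthesis characters once and inspecting its last element.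
import Mathlib
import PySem

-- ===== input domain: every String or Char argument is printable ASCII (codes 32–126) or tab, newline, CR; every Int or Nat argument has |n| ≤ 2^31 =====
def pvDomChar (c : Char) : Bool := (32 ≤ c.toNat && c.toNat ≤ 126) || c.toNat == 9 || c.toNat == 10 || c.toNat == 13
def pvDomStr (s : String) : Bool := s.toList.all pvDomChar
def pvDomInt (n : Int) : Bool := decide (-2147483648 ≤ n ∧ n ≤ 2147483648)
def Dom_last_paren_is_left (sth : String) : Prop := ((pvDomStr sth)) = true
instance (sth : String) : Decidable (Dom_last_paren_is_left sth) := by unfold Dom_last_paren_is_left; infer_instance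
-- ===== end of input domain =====

-- B filters the parenthesis characters once and inspects the last one, instead of A's
-- reverse index scan with early exit; same O(n) cost, simpler decomposition.

-- ===== PORT A =====
-- A's while-loop scans indices len-1 … 0; ported as structural recursion over the
-- reversed character list, which visits exactly sth[k] for k = len-1, …, 0 in order.
def lastParenLoop : List Char → Bool
  | [] => false
  | c :: rest => if c = '(' then true else if c = ')' then false else lastParenLoop rest

def last_paren_is_left (sth : String) : Bool := lastParenLoop sth.toList.reverse

-- ===== PORT B =====
def last_paren_is_left_alt (sth : String) : Bool :=
  let parens := sth.toList.filter (fun c => c == '(' || c == ')')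
  !parens.isEmpty && (PySem.List.pyGet? parens (-1) == some '(')

-- ===== PRECONDITION & SPEC =====
def Spec_last_paren_is_left (sth : String) (out : Bool) : Prop := out = last_paren_is_left_alt sth
instance (sth : String) (out : Bool) : Decidable (Spec_last_paren_is_left sth out) := by unfold Spec_last_paren_is_left; infer_instance

-- ===== CLAIM (what is proved, stated in full; the proofs are below) =====
def Claim_equal_last_paren_is_left : Prop := ∀ (sth : String), Dom_last_paren_is_left sth → Spec_last_paren_is_left sth (last_paren_is_left sth)

-- ===== LEMMAS AND PROOFS =====

theorem lastParenLoop_head? (l : List Char) :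
    lastParenLoop l = ((l.filter (fun c => c == '(' || c == ')')).head? == some '(') := by
  induction l with
  | nil => simp [lastParenLoop]
  | cons c rest ih =>
    by_cases hc : c = '('
    · simp [lastParenLoop, hc]
    · by_cases hc2 : c = ')'
      · simp [lastParenLoop, hc2]
      · simpa [lastParenLoop, hc, hc2, List.filter_cons] using ih

-- ===== VERDICT (by name: the statement is the Claim_ definition above) =====
theorem last_paren_is_left_spec : Claim_equal_last_paren_is_left := by
  intro sth _
  unfold Spec_last_paren_is_left last_paren_is_left last_paren_is_left_alt
  rw [lastParenLoop_head?, List.filter_reverse, List.head?_reverse]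
  simp only [PySem.List.pyGet?_neg_one]
  rcases h : (sth.toList.filter (fun c => c == '(' || c == ')')) with _ | ⟨x, xs⟩
  · simp
  · have : ((x :: xs : List Char).isEmpty) = false := rfl
    simp [this]
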